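-- pv_equiv track=rewrite | github.com/ArefBz34/NeuroAI | NeuroAI/__init__.py | ensemble_results
-- ===== SOURCE A (Python) =====
-- from typing import TypedDict, Optional
--
-- class DatasetState(TypedDict):
--     paper_text: str
--     dataset_name: Optional[str]
--     doi: Optional[str]
--     url: Optional[str]
--     year: Optional[str]
--     access_type: Optional[str]
--     institution: Optional[str]
--     country: Optional[str]
--     modality: Optional[str]
--     subject: Optional[str]
--     slice_scan_no: Optional[str]
--     format: Optional[str]
--     segmentation_mask: Optional[str]
--     disease: Optional[str]
--
-- def ensemble_results(chunk_results):
--     ensembled = {}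
--     fields = [k for k in DatasetState.__annotations__ if k != "paper_text"]
--     for field in fields:
--         values = [result.get(field, "Not specified") for result in chunk_results]
--         for value in values:
--             if value != "Not specified":
--                 ensembled[field] = value
--                 break
--         else:
--             ensembled[field] = "Not specified"
--     return ensembled
-- ===== SOURCE B (Python) =====
-- from typing import TypedDict, Optional
--
-- class DatasetState(TypedDict):
--     paper_text: str
--     dataset_name: Optional[str]
--     doi: Optional[str]
--     url: Optional[str]
--     year: Optional[str]
--     access_type: Optional[str]
--     institution: Optional[str]
--     country: Optional[str]
--     modality: Optional[str]
--     subject: Optional[str]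
--     slice_scan_no: Optional[str]
--     format: Optional[str]
--     segmentation_mask: Optional[str]
--     disease: Optional[str]
--
-- def ensemble_results(chunk_results):
--     fields = [k for k in DatasetState.__annotations__ if k != "paper_text"]
--     # Build one merged index back-to-front: walking the results in REVERSE and
--     # overwriting on every non-default entry makes the EARLIEST non-default
--     # value win, without ever scanning a field across the results.
--     merged = {}
--     for result in reversed(chunk_results):
--         for k, v in result.items():
--             if v != "Not specified":
--                 merged[k] = v
--     # Project the merged index onto the schema fields, in schema order.
--     return {f: merged.get(f, "Not specified") for f in fields}
-- ===== Notes on version B (the rewrite author's own statement) =====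
-- stated objective: alternative
-- what changed: Instead of A's per-field scan across all results (building the list of a field's values and taking its first non-default element, field by field), B builds a single merged dict in one backward pass over the results -- overwriting on every non-default entry so the earliest result wins -- and then projects that index onto the schema fields; no field is ever scanned across the results.
import Mathlib
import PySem

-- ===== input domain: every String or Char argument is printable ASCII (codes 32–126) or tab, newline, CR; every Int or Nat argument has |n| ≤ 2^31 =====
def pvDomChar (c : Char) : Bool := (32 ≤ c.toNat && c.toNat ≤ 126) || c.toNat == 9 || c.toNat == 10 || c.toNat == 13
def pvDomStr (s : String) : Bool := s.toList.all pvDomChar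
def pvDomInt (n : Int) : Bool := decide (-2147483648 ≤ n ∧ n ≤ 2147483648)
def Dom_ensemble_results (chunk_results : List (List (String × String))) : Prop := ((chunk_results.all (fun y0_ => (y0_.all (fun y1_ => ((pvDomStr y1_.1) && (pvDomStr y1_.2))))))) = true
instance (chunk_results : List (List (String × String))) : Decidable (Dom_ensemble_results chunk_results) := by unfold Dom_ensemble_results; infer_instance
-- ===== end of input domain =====

-- B replaces A's per-field scan across the results by one backward merge pass building a
-- single dict (earliest non-default entry wins) that is then projected onto the fields
-- (alternative algorithm, same return value).

-- ===== PORT A =====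
-- the fields of DatasetState minus "paper_text" (shared constant of both programs)
def pvFields : List String :=
  ["dataset_name", "doi", "url", "year", "access_type", "institution", "country",
   "modality", "subject", "slice_scan_no", "format", "segmentation_mask", "disease"]

-- A's inner `for value in values: … break / else:` — first value ≠ "Not specified", else "Not specified"
def pvFirstNonDefault : List String → String
  | [] => "Not specified"
  | v :: vs => if v ≠ "Not specified" then v else pvFirstNonDefault vs

def ensemble_results (chunk_results : List (List (String × String))) : List (String × String) :=
  -- values = [result.get(field, "Not specified") for result in chunk_results], consumed by pvFirstNonDefault
  (pvFields.foldl (fun ensembled field =>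
      ensembled.insert field
        (pvFirstNonDefault (chunk_results.map (fun result => (PySem.Dict.mk result).getD field "Not specified"))))
    PySem.Dict.empty).items

-- ===== PORT B =====
def ensemble_results_alt (chunk_results : List (List (String × String))) : List (String × String) :=
  -- backward merge pass: `for result in reversed(chunk_results): for k, v in result.items(): …`
  -- projection: `{f: merged.get(f, "Not specified") for f in fields}`, with merged inlined
  (pvFields.foldl (fun d f => d.insert f
      ((chunk_results.reverse.foldl
          (fun merged result =>
            result.foldl (fun merged p =>
              if p.2 ≠ "Not specified" then merged.insert p.1 p.2 else merged) merged)
          PySem.Dict.empty).getD f "Not specified"))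
    PySem.Dict.empty).items

-- ===== PRECONDITION & SPEC =====
-- Pre_ excludes chunk lists in which some inner association list carries a duplicate key:
-- such a list is an ambiguous representation of a Python dict (which cannot hold duplicate
-- keys), and A's first-binding read and B's overwrite-merge may legitimately disagree there.
def Pre_ensemble_results (chunk_results : List (List (String × String))) : Prop :=
  ∀ r ∈ chunk_results, (r.map Prod.fst).Nodup
instance (chunk_results : List (List (String × String))) : Decidable (Pre_ensemble_results chunk_results) := by unfold Pre_ensemble_results; infer_instance

def pvWitness_ensemble_results : (List (List (String × String))) :=
  [[("dataset_name", "BraTS"), ("doi", "Not specified")], [("doi", "10.1/xyz")]]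

def Spec_ensemble_results (chunk_results : List (List (String × String))) (out : List (String × String)) : Prop := out = ensemble_results_alt chunk_results
instance (chunk_results : List (List (String × String))) (out : List (String × String)) : Decidable (Spec_ensemble_results chunk_results out) := by unfold Spec_ensemble_results; infer_instance

-- ===== CLAIM (what is proved, stated in full; the proofs are below) =====
def Claim_equal_ensemble_results : Prop := ∀ (chunk_results : List (List (String × String))), Dom_ensemble_results chunk_results → Pre_ensemble_results chunk_results → Spec_ensemble_results chunk_results (ensemble_results chunk_results)

-- ===== LEMMAS AND PROOFS =====

-- A's per-field result, as a recursion over the chunk list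
def pvPick (f : String) : List (List (String × String)) → String
  | [] => "Not specified"
  | r :: rs =>
    let v := (PySem.Dict.mk r).getD f "Not specified"
    if v ≠ "Not specified" then v else pvPick f rs

theorem pvFirst_eq_pick (f : String) : ∀ rs : List (List (String × String)),
    pvFirstNonDefault (rs.map (fun r => (PySem.Dict.mk r).getD f "Not specified")) = pvPick f rs := by
  intro rs
  induction rs with
  | nil => rfl
  | cons r rs ih => simp [pvFirstNonDefault, pvPick, ih]

theorem pvPick_append (f : String) : ∀ xs ys : List (List (String × String)),
    pvPick f (xs ++ ys) =
      (if pvPick f xs ≠ "Not specified" then pvPick f xs else pvPick f ys) := by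
  intro xs ys
  induction xs with
  | nil => simp [pvPick]
  | cons r xs ih =>
    by_cases h : (PySem.Dict.mk r).getD f "Not specified" = "Not specified" <;>
      simp [pvPick, h, ih]

-- if f is not a key of r, the merge step over r leaves the lookup of f unchanged
theorem pvMergeOne_absent (f : String) : ∀ (r : List (String × String)) (m : PySem.Dict String String),
    f ∉ r.map Prod.fst →
    (r.foldl (fun m p => if p.2 ≠ "Not specified" then m.insert p.1 p.2 else m) m).getD f "Not specified"
      = m.getD f "Not specified" := by
  intro r
  induction r with
  | nil => intro m _; rfl
  | cons p r ih =>
    intro m h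
    rw [List.map_cons, List.mem_cons, not_or] at h
    rw [List.foldl_cons]
    by_cases hv : p.2 = "Not specified"
    · rw [if_neg (by simp [hv])]
      exact ih m h.2
    · rw [if_pos hv, ih _ h.2]
      exact PySem.Dict.getD_insert_of_ne m _ _ h.1

-- the merge step over one duplicate-free result behaves like one conditional overwrite at f
theorem pvMergeOne (f : String) : ∀ (r : List (String × String)) (m : PySem.Dict String String),
    (r.map Prod.fst).Nodup →
    (r.foldl (fun m p => if p.2 ≠ "Not specified" then m.insert p.1 p.2 else m) m).getD f "Not specified"
      = (if (PySem.Dict.mk r).getD f "Not specified" ≠ "Not specified"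
         then (PySem.Dict.mk r).getD f "Not specified" else m.getD f "Not specified") := by
  intro r
  induction r with
  | nil =>
    intro m _
    simp [PySem.Dict.getD_eq_get?_getD, PySem.Dict.get?]
  | cons p r ih =>
    intro m hnd
    rw [List.map_cons] at hnd
    obtain ⟨h1, hnd'⟩ := List.nodup_cons.mp hnd
    have hmk : (PySem.Dict.mk (p :: r)).getD f "Not specified"
        = (if p.1 == f then p.2 else (PySem.Dict.mk r).getD f "Not specified") := by
      rw [PySem.Dict.getD_eq_get?_getD]
      rcases p with ⟨k, v⟩
      rw [PySem.Dict.get?_mk_cons]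
      by_cases hk : (k == f) = true
      · simp [hk]
      · simp [hk, PySem.Dict.getD_eq_get?_getD]
    rw [List.foldl_cons]
    by_cases hk : p.1 = f
    · -- the head binds f; f does not occur in the tail (Nodup)
      have habs : f ∉ r.map Prod.fst := hk ▸ h1
      by_cases hv : p.2 = "Not specified"
      · -- default value at the head: the row contributes nothing for f
        have hr : (PySem.Dict.mk r).getD f "Not specified" = "Not specified" := by
          rw [PySem.Dict.getD_eq_get?_getD,
            (PySem.Dict.get?_eq_none_iff_not_mem_keys _ f).mpr
              (by simpa [PySem.Dict.keys_mk] using habs)]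
          rfl
        rw [if_neg (by simp [hv]), pvMergeOne_absent f r m habs, hmk]
        simp [hk, hv]
      · rw [if_pos hv, pvMergeOne_absent f r _ habs, hmk]
        have hins : (m.insert p.1 p.2).getD f "Not specified" = p.2 := by
          rw [hk]; exact PySem.Dict.getD_insert_self ..
        simp [hk, hv]
    · -- the head binds another key: lookup of f passes through
      by_cases hv : p.2 = "Not specified"
      · rw [if_neg (by simp [hv]), ih m hnd', hmk]
        simp [hk]
      · rw [if_pos hv, ih _ hnd', hmk,
          PySem.Dict.getD_insert_of_ne m _ _ (fun he => hk he.symm)]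
        simp [hk]

-- the whole backward merge, expressed through A's per-field pick over the processed list reversed
theorem pvMerge (f : String) : ∀ (rs : List (List (String × String))) (m : PySem.Dict String String),
    (∀ r ∈ rs, (r.map Prod.fst).Nodup) →
    (rs.foldl (fun merged result =>
        result.foldl (fun merged p =>
          if p.2 ≠ "Not specified" then merged.insert p.1 p.2 else merged) merged) m).getD f "Not specified"
      = (if pvPick f rs.reverse ≠ "Not specified" then pvPick f rs.reverse
         else m.getD f "Not specified") := by
  intro rs
  induction rs with
  | nil => intro m _; simp [pvPick]
  | cons r rs ih =>
    intro m hnd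
    rw [List.foldl_cons, ih _ (fun r hr => hnd r (List.mem_cons_of_mem _ hr)),
      List.reverse_cons, pvPick_append, pvMergeOne f r m (hnd r (by simp))]
    by_cases hp : pvPick f rs.reverse = "Not specified"
    · by_cases hv : (PySem.Dict.mk r).getD f "Not specified" = "Not specified"
      · simp [hp, hv, pvPick]
      · simp [hp, hv, pvPick]
    · simp [hp]

-- ===== VERDICT (by name: the statement is the Claim_ definition above) =====
theorem ensemble_results_spec : Claim_equal_ensemble_results := by
  intro rs _ hpre
  unfold Spec_ensemble_results ensemble_results ensemble_results_alt
  rw [PySem.Dict.items_foldl_insert_fresh pvFields (fun f => f) _ PySem.Dict.empty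
        (fun _ _ => rfl) (by decide),
      PySem.Dict.items_foldl_insert_fresh pvFields (fun f => f) _ PySem.Dict.empty
        (fun _ _ => rfl) (by decide)]
  simp only [show (PySem.Dict.empty : PySem.Dict String String).items = [] from rfl, List.nil_append]
  refine List.map_congr_left ?_
  intro f _
  have hpre' : ∀ r ∈ rs.reverse, (r.map Prod.fst).Nodup := by
    intro r hr; exact hpre r (List.mem_reverse.mp hr)
  rw [pvFirst_eq_pick, pvMerge f rs.reverse PySem.Dict.empty hpre', List.reverse_reverse]
  by_cases hp : pvPick f rs = "Not specified"
  · rw [if_neg (by simp [hp]), hp]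
    rfl
  · simp [hp]
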